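-- pv_equiv track=rewrite | github.com/ModelW/project-maker | src/model_w/project_maker/__main__.py | keys_text
-- ===== SOURCE A (Python) =====
-- def keys_text(choices, labels):
--     out = []
--
--     for key, choice in choices.items():
--         if choice and key in labels:
--             out.append(labels[key])
--
--     out_str = ""
--
--     for i, label in enumerate(out):
--         if i == 0:
--             out_str += f"[bold]{label}[/bold]"
--         elif i == len(out) - 1:
--             out_str += f" and [bold]{label}[/bold]"
--         else:
--             out_str += f", [bold]{label}[/bold]"
--
--     return out_str
-- ===== SOURCE B (Python) =====
-- def keys_text(choices, labels):
--     items = [f"[bold]{labels[k]}[/bold]" for k, c in choices.items() if c and k in labels]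
--     if not items:
--         return ""
--     if len(items) == 1:
--         return items[0]
--     return ", ".join(items[:-1]) + " and " + items[-1]
-- ===== Notes on version B (the rewrite author's own statement) =====
-- stated objective: idiomatic
-- what changed: Replaces A's enumerate loop with per-index position branching (i==0 / i==len-1 / middle) by a comprehension building the bolded items followed by a single join over items[:-1] plus ' and ' and the last item.
import Mathlib
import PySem

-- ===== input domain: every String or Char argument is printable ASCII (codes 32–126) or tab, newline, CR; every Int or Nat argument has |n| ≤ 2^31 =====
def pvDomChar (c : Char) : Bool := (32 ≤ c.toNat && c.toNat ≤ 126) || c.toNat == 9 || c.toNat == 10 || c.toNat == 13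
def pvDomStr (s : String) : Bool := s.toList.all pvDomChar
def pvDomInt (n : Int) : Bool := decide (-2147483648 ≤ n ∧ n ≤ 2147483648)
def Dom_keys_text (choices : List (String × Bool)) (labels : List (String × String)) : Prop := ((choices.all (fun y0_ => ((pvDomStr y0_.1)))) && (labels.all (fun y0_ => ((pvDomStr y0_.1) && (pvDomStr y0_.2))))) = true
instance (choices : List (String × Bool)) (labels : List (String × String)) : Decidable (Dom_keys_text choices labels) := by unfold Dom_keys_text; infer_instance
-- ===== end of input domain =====

-- B replaces A's enumerate/per-position-branch string accumulation by a comprehension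
-- plus a single join over all-but-last items followed by the " and " final item (idiomatic).


-- ===== PORT A =====
-- literal port: first loop collects labels[key] for truthy keys present in labels;
-- second loop walks enumerate(out) and picks "", " and " or ", " by position.
def keys_text (choices : List (String × Bool)) (labels : List (String × String)) : String :=
  let out : List String := choices.foldl (fun acc kc =>
    if kc.2 && (labels.lookup kc.1).isSome then acc ++ [(labels.lookup kc.1).getD ""] else acc) []
  (PySem.List.enumerate out 0).foldl (fun s il =>
    if il.1 = 0 then s ++ ("[bold]" ++ il.2 ++ "[/bold]")
    else if il.1 = (out.length : Int) - 1 then s ++ (" and [bold]" ++ il.2 ++ "[/bold]")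
    else s ++ (", [bold]" ++ il.2 ++ "[/bold]")) ""

-- ===== PORT B =====
-- literal port of Source B: comprehension (filterMap) building the bolded items, then
-- "" / single item / join(items[:-1]) ++ " and " ++ items[-1].
def keys_text_alt (choices : List (String × Bool)) (labels : List (String × String)) : String :=
  let items : List String := choices.filterMap (fun kc =>
    if kc.2 && (labels.lookup kc.1).isSome then
      some ("[bold]" ++ (labels.lookup kc.1).getD "" ++ "[/bold]")
    else none)
  match items with
  | [] => ""
  | [x] => x
  | x :: y :: rest =>
      PySem.Str.join ", " (List.dropLast (x :: y :: rest)) ++ " and "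
        ++ List.getLast (x :: y :: rest) (List.cons_ne_nil x (y :: rest))

-- ===== PRECONDITION & SPEC =====
def Spec_keys_text (choices : List (String × Bool)) (labels : List (String × String)) (out : String) : Prop := out = keys_text_alt choices labels
instance (choices : List (String × Bool)) (labels : List (String × String)) (out : String) : Decidable (Spec_keys_text choices labels out) := by unfold Spec_keys_text; infer_instance

-- ===== CLAIM (what is proved, stated in full; the proofs are below) =====
def Claim_equal_keys_text : Prop := ∀ (choices : List (String × Bool)) (labels : List (String × String)), Dom_keys_text choices labels → Spec_keys_text choices labels (keys_text choices labels)

-- ===== LEMMAS AND PROOFS =====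

/-- the bold wrapper both programs apply to each selected label -/
def pvBold (s : String) : String := "[bold]" ++ s ++ "[/bold]"

/-- the text A's second loop produces for the elements at positions ≥ 1 -/
def pvT : List String → String
  | [] => ""
  | [y] => " and [bold]" ++ y ++ "[/bold]"
  | y :: z :: r => ", [bold]" ++ y ++ "[/bold]" ++ pvT (z :: r)

/-- the common meaning of both programs on the selected-label list -/
def pvJ : List String → String
  | [] => ""
  | x :: t => "[bold]" ++ x ++ "[/bold]" ++ pvT t

/-- join over a two-or-more list peels its head -/
lemma str_join_cons_cons (s a b : String) (l : List String) :
    PySem.Str.join s (a :: b :: l) = a ++ s ++ PySem.Str.join s (b :: l) := by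
  simp [PySem.Str.join, PySem.Chars.join_cons_cons, String.append_assoc]

/-- B's comprehension = map pvBold over the raw selected labels -/
lemma filterMap_bold (choices : List (String × Bool)) (p : String × Bool → Bool)
    (v : String × Bool → String) :
    choices.filterMap (fun kc => if p kc then some (pvBold (v kc)) else none)
      = ((choices.filter p).map v).map pvBold := by
  induction choices with
  | nil => rfl
  | cons kc rest ih =>
      by_cases h : p kc = true <;> simp [h, ih]

/-- A's enumerate loop over the tail (indices ≥ 1) appends exactly pvT -/
lemma enumFoldT (n : Int) (t : List String) : ∀ (s : String) (k : Int), 1 ≤ k → k + t.length = n →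
    (PySem.List.enumerate t k).foldl (fun s il =>
      if il.1 = 0 then s ++ ("[bold]" ++ il.2 ++ "[/bold]")
      else if il.1 = n - 1 then s ++ (" and [bold]" ++ il.2 ++ "[/bold]")
      else s ++ (", [bold]" ++ il.2 ++ "[/bold]")) s = s ++ pvT t := by
  induction t with
  | nil => intro s k hk hn; simp [PySem.List.enumerate_nil, pvT, String.append_empty]
  | cons y rest ih =>
      intro s k hk hn
      rw [PySem.List.enumerate_cons]
      have hk0 : ¬ (k = 0) := by omega
      cases rest with
      | nil =>
          have hlast : k = n - 1 := by simp at hn; omega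
          simp only [List.foldl_cons, PySem.List.enumerate_nil, List.foldl_nil,
            if_neg hk0, if_pos hlast]
          simp [pvT, ← String.append_assoc]
      | cons z r =>
          have hnl : ¬ (k = n - 1) := by simp at hn; omega
          have := ih (s ++ (", [bold]" ++ y ++ "[/bold]")) (k + 1) (by omega)
            (by simp at hn ⊢; omega)
          simp only [List.foldl_cons, if_neg hk0, if_neg hnl] at this ⊢
          rw [this]
          simp [pvT, ← String.append_assoc]

/-- A computes pvJ of its selected-label list -/
lemma keys_text_eq_pvJ (choices : List (String × Bool)) (labels : List (String × String)) :
    keys_text choices labels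
      = pvJ ((choices.filter (fun kc => kc.2 && (labels.lookup kc.1).isSome)).map
          (fun kc => (labels.lookup kc.1).getD "")) := by
  unfold keys_text
  rw [PySem.List.foldl_append_if (fun kc => kc.2 && (labels.lookup kc.1).isSome)
      (fun kc => (labels.lookup kc.1).getD "") choices []]
  simp only [List.nil_append]
  set L := (choices.filter (fun kc => kc.2 && (labels.lookup kc.1).isSome)).map
      (fun kc => (labels.lookup kc.1).getD "") with hL
  clear_value L
  cases L with
  | nil => simp [PySem.List.enumerate_nil, pvJ]
  | cons x t =>
      rw [PySem.List.enumerate_cons]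
      simp only [List.foldl_cons, if_true, zero_add]
      refine (enumFoldT (((x :: t).length : Nat) : Int) t ("" ++ ("[bold]" ++ x ++ "[/bold]")) 1
        (by omega) (by simp; omega)).trans ?_
      simp [pvJ, ← String.append_assoc]

/-- B's final grammar equals pvJ on any mapped-bold list of length ≥ 2 -/
lemma bjoinT (r : List String) : ∀ (x y : String),
    PySem.Str.join ", " (List.dropLast (pvBold x :: pvBold y :: r.map pvBold)) ++ " and "
        ++ List.getLast (pvBold x :: pvBold y :: r.map pvBold)
            (List.cons_ne_nil (pvBold x) (pvBold y :: r.map pvBold))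
      = pvBold x ++ pvT (y :: r) := by
  induction r with
  | nil =>
      intro x y
      apply String.toList_inj.mp
      simp [PySem.Str.join, PySem.Chars.join_singleton, pvT, pvBold]
  | cons z r' ih =>
      intro x y
      have hg : List.getLast (pvBold x :: pvBold y :: pvBold z :: r'.map pvBold)
            (List.cons_ne_nil _ _)
          = List.getLast (pvBold y :: pvBold z :: r'.map pvBold) (List.cons_ne_nil _ _) :=
        List.getLast_cons _
      simp only [List.map_cons] at ih ⊢
      rw [List.dropLast_cons₂, hg]
      have hj : PySem.Str.join ", " (pvBold x :: List.dropLast (pvBold y :: pvBold z :: r'.map pvBold))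
          = pvBold x ++ ", " ++ PySem.Str.join ", " (List.dropLast (pvBold y :: pvBold z :: r'.map pvBold)) := by
        rw [List.dropLast_cons₂]
        exact str_join_cons_cons ", " _ _ _
      rw [hj]
      have hih := ih y z
      calc pvBold x ++ ", " ++ PySem.Str.join ", " (List.dropLast (pvBold y :: pvBold z :: r'.map pvBold))
            ++ " and " ++ List.getLast (pvBold y :: pvBold z :: r'.map pvBold) (List.cons_ne_nil _ _)
          = pvBold x ++ ", " ++ (PySem.Str.join ", " (List.dropLast (pvBold y :: pvBold z :: r'.map pvBold))
            ++ " and " ++ List.getLast (pvBold y :: pvBold z :: r'.map pvBold) (List.cons_ne_nil _ _)) := by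
            simp [← String.append_assoc]
        _ = pvBold x ++ ", " ++ (pvBold y ++ pvT (z :: r')) := by rw [hih]
        _ = pvBold x ++ pvT (y :: z :: r') := by
            apply String.toList_inj.mp
            simp [pvT, pvBold]

/-- B computes pvJ of the same selected-label list -/
lemma keys_text_alt_eq_pvJ (choices : List (String × Bool)) (labels : List (String × String)) :
    keys_text_alt choices labels
      = pvJ ((choices.filter (fun kc => kc.2 && (labels.lookup kc.1).isSome)).map
          (fun kc => (labels.lookup kc.1).getD "")) := by
  unfold keys_text_alt
  have hfm : choices.filterMap (fun kc =>
      if kc.2 && (labels.lookup kc.1).isSome then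
        some ("[bold]" ++ (labels.lookup kc.1).getD "" ++ "[/bold]")
      else none)
      = ((choices.filter (fun kc => kc.2 && (labels.lookup kc.1).isSome)).map
          (fun kc => (labels.lookup kc.1).getD "")).map pvBold := by
    rw [← filterMap_bold choices _ _]; rfl
  rw [hfm]
  set L := (choices.filter (fun kc => kc.2 && (labels.lookup kc.1).isSome)).map
      (fun kc => (labels.lookup kc.1).getD "") with hL
  clear_value L
  match L with
  | [] => rfl
  | [x] => simp [pvJ, pvT, pvBold, String.append_empty]
  | x :: y :: r =>
      simp only [List.map_cons]
      rw [show (pvJ (x :: y :: r)) = pvBold x ++ pvT (y :: r) from rfl]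
      exact bjoinT r x y

-- ===== VERDICT (by name: the statement is the Claim_ definition above) =====
theorem keys_text_spec : Claim_equal_keys_text := by
  intro choices labels _hdom
  unfold Spec_keys_text
  rw [keys_text_eq_pvJ, keys_text_alt_eq_pvJ]
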